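-- pv_equiv track=rewrite | github.com/CaranthirLjh/Leetcode | Company/Amazon/amz-shipParcels.py | shipParcels
-- ===== SOURCE A (Python) =====
-- def shipParcels(parcels, k):
--     l = len(parcels)
--     parcels = set(parcels)
--     remain = k-l
--     cur = 1
--     ans = 0
--     while(remain>0):
--         if cur not in parcels:
--             ans += cur
--             remain -= 1
--         cur += 1
--     return ans
-- ===== SOURCE B (Python) =====
-- def shipParcels(parcels, k):
--     remain = k - len(parcels)
--     if remain <= 0:
--         return 0
--     ans = 0
--     prev = 0  # largest integer already accounted for / skipped
--     for p in sorted(set(parcels)):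
--         if p <= prev:
--             continue
--         gap = p - prev - 1
--         take = min(gap, remain)
--         ans += take * prev + take * (take + 1) // 2
--         remain -= take
--         if remain == 0:
--             return ans
--         prev = p
--     return ans + remain * prev + remain * (remain + 1) // 2
-- ===== Notes on version B (the rewrite author's own statement) =====
-- stated objective: faster
-- what changed: Instead of testing every integer 1,2,3,... against the set until k-len(parcels) missing numbers are found, B sorts the distinct parcels once and sums whole gaps between consecutive parcels with arithmetic-series formulas.
import Mathlib
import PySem

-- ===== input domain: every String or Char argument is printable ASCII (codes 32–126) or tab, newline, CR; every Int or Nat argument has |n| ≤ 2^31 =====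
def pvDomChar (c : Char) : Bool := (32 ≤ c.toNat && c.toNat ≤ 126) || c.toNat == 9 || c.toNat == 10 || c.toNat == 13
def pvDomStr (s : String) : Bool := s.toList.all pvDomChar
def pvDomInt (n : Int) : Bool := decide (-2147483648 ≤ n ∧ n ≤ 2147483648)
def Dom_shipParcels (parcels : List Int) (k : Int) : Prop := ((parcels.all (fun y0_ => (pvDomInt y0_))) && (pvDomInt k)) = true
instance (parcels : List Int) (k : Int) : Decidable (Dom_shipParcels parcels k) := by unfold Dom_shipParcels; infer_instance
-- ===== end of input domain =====

-- B replaces A's one-by-one scan of the positive integers with a sort of the distinct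
-- parcels plus arithmetic-series sums over the gaps (objective: faster).

-- ===== PORT A =====

-- the while loop of A: state (remain, cur, ans) over the set S; the Nat fuel only makes the
-- recursion structural — each iteration strictly decreases remain.toNat + #{x ∈ S | cur ≤ x},
-- so with that initial fuel the fuel never runs out before the loop's own exit (proved below)
def pvLoopA (S : List Int) (fuel : Nat) (remain cur ans : Int) : Int :=
  match fuel with
  | 0 => ans
  | fuel + 1 =>
    if 0 < remain then
      if cur ∈ S then pvLoopA S fuel remain (cur + 1) ans
      else pvLoopA S fuel (remain - 1) (cur + 1) (ans + cur)
    else ans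

def shipParcels (parcels : List Int) (k : Int) : Int :=
  let l : Int := parcels.length
  let s := PySem.Set.ofList parcels
  pvLoopA s ((k - l).toNat + (s.filter (fun x => decide (1 ≤ x))).length) (k - l) 1 0

-- ===== PORT B =====

-- the for loop of B over the sorted distinct parcels, state (ans, prev, remain)
def pvLoopB (xs : List Int) (ans prev remain : Int) : Int :=
  match xs with
  | [] => ans + remain * prev + PySem.Int.floordiv (remain * (remain + 1)) 2
  | p :: rest =>
    if p ≤ prev then pvLoopB rest ans prev remain
    else
      let gap := p - prev - 1
      let take := min gap remain
      let ans' := ans + take * prev + PySem.Int.floordiv (take * (take + 1)) 2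
      let remain' := remain - take
      if remain' = 0 then ans' else pvLoopB rest ans' p remain'

def shipParcels_alt (parcels : List Int) (k : Int) : Int :=
  let remain := k - parcels.length
  if remain ≤ 0 then 0
  else pvLoopB (PySem.List.sorted (PySem.Set.ofList parcels) (fun x => x) false) 0 0 remain

-- ===== PRECONDITION & SPEC =====
def Spec_shipParcels (parcels : List Int) (k : Int) (out : Int) : Prop := out = shipParcels_alt parcels k
instance (parcels : List Int) (k : Int) (out : Int) : Decidable (Spec_shipParcels parcels k out) := by unfold Spec_shipParcels; infer_instance

-- ===== CLAIM (what is proved, stated in full; the proofs are below) =====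
def Claim_equal_shipParcels : Prop := ∀ (parcels : List Int) (k : Int), Dom_shipParcels parcels k → Spec_shipParcels parcels k (shipParcels parcels k)

-- ===== LEMMAS AND PROOFS =====

-- counting elements of S above a threshold is antitone in the threshold
theorem pvFilter_le (S : List Int) (a b : Int) (hab : a ≤ b) :
    (S.filter (fun x => decide (b ≤ x))).length ≤ (S.filter (fun x => decide (a ≤ x))).length := by
  have hsub : S.filter (fun x => decide (b ≤ x))
      = (S.filter (fun x => decide (a ≤ x))).filter (fun x => decide (b ≤ x)) := by
    rw [List.filter_filter]
    apply List.filter_congr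
    intro x _
    by_cases h1 : b ≤ x
    · have : a ≤ x := by omega
      simp [h1, this]
    · simp [h1]
  rw [hsub]
  exact List.length_filter_le _ _

-- …and drops strictly past a member of S
theorem pvFilter_lt (S : List Int) (a b : Int) (hab : a ≤ b) (hb : b ∈ S) :
    (S.filter (fun x => decide (b + 1 ≤ x))).length < (S.filter (fun x => decide (a ≤ x))).length := by
  have hstep : (S.filter (fun x => decide (b + 1 ≤ x))).length < (S.filter (fun x => decide (b ≤ x))).length := by
    have hsub : S.filter (fun x => decide (b + 1 ≤ x))
        = (S.filter (fun x => decide (b ≤ x))).filter (fun x => decide (b + 1 ≤ x)) := by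
      rw [List.filter_filter]
      apply List.filter_congr
      intro x _
      by_cases h1 : b + 1 ≤ x
      · have : b ≤ x := by omega
        simp [h1, this]
      · simp [h1]
    rw [hsub]
    apply List.length_filter_lt_length_iff_exists.2
    exact ⟨b, by simp [hb], by simp⟩
  exact lt_of_lt_of_le hstep (pvFilter_le S a b hab)

-- with nothing left to collect the loop returns its accumulator whatever the fuel
theorem pvLoopA_zero (S : List Int) (fuel : Nat) (remain cur ans : Int) (h : remain ≤ 0) :
    pvLoopA S fuel remain cur ans = ans := by
  cases fuel with
  | zero => rfl
  | succ f => rw [pvLoopA, if_neg (by omega)]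

-- sum of the n consecutive integers a, a+1, …, a+n-1
def pvSum (a : Int) (n : Nat) : Int :=
  match n with
  | 0 => 0
  | n + 1 => a + pvSum (a + 1) n

theorem pvSum_closed (a : Int) (n : Nat) : 2 * pvSum a n = n * (2 * a + n - 1) := by
  induction n generalizing a with
  | zero => simp [pvSum]
  | succ m ih =>
    have := ih (a + 1)
    simp only [pvSum]
    push_cast [this]
    push_cast at this
    ring_nf
    ring_nf at this
    omega

-- closed form B uses: pvSum (prev+1) t = t*prev + t*(t+1)//2  (t = take.toNat, take ≥ 0)
theorem pvSum_eq_formula (prev take : Int) (h : 0 ≤ take) :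
    pvSum (prev + 1) take.toNat = take * prev + PySem.Int.floordiv (take * (take + 1)) 2 := by
  have h2 : 2 * pvSum (prev + 1) take.toNat = take.toNat * (2 * (prev + 1) + take.toNat - 1) :=
    pvSum_closed _ _
  have ht : (take.toNat : Int) = take := Int.toNat_of_nonneg h
  rw [ht] at h2
  obtain ⟨m, hm⟩ := Int.even_mul_succ_self take
  have hfd : PySem.Int.floordiv (take * (take + 1)) 2 = m := by
    rw [PySem.Int.floordiv_eq_ediv_of_pos (by omega : (0:Int) < 2), hm]
    omega
  rw [hfd]
  nlinarith [h2, hm]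

-- A's loop beyond all elements of S: remain consecutive integers
theorem pvLoopA_tail (S : List Int) : ∀ (fuel : Nat) (remain cur ans : Int),
    remain.toNat ≤ fuel → (∀ x ∈ S, x < cur) →
    pvLoopA S fuel remain cur ans = ans + pvSum cur remain.toNat := by
  intro fuel
  induction fuel with
  | zero =>
    intro remain cur ans hf _
    have : remain.toNat = 0 := by omega
    simp [pvLoopA, this, pvSum]
  | succ f ih =>
    intro remain cur ans hf hlt
    by_cases hr : 0 < remain
    · have hcs : cur ∉ S := fun hc => absurd (hlt cur hc) (by omega)
      rw [pvLoopA, if_pos hr, if_neg hcs]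
      rw [ih (remain - 1) (cur + 1) (ans + cur) (by omega)
        (fun x hx => by have := hlt x hx; omega)]
      have : remain.toNat = (remain - 1).toNat + 1 := by omega
      rw [this]
      simp [pvSum]
      ring
    · rw [pvLoopA, if_neg hr]
      have : remain.toNat = 0 := by omega
      simp [this, pvSum]

-- A's loop sweeps an S-free interval [cur, p) in one block
theorem pvLoopA_gap (S : List Int) (p : Int) : ∀ (n fuel : Nat) (remain cur ans : Int),
    p - cur = n → min remain.toNat n ≤ fuel → 0 < remain → (∀ x ∈ S, ¬(cur ≤ x ∧ x < p)) →
    pvLoopA S fuel remain cur ans =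
      if remain ≤ p - cur then ans + pvSum cur remain.toNat
      else pvLoopA S (fuel - n) (remain - (p - cur)) p (ans + pvSum cur (p - cur).toNat) := by
  intro n
  induction n with
  | zero =>
    intro fuel remain cur ans hn _ hr _
    have hpc : p = cur := by omega
    subst hpc
    simp only [sub_self]
    rw [if_neg (by omega)]
    simp [pvSum]
  | succ m ih =>
    intro fuel remain cur ans hn hfuel hr hfree
    have hcs : cur ∉ S := fun hc => hfree cur hc ⟨le_refl _, by omega⟩
    obtain ⟨f, hf⟩ : ∃ f, fuel = f + 1 := ⟨fuel - 1, by omega⟩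
    subst hf
    rw [pvLoopA, if_pos hr, if_neg hcs]
    by_cases h1 : remain = 1
    · subst h1
      have h10 : (1 : Int) - 1 = 0 := by ring
      rw [h10, pvLoopA_zero S f 0 (cur + 1) (ans + cur) (by omega)]
      rw [if_pos (by omega)]
      simp [pvSum]
    · rw [ih f (remain - 1) (cur + 1) (ans + cur) (by omega) (by omega) (by omega)
        (fun x hx hb => hfree x hx ⟨by omega, hb.2⟩)]
      by_cases h2 : remain ≤ p - cur
      · rw [if_pos (by omega), if_pos h2]
        have : remain.toNat = (remain - 1).toNat + 1 := by omega
        rw [this]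
        simp [pvSum]
        ring
      · rw [if_neg (by omega), if_neg h2]
        have he : remain - 1 - (p - (cur + 1)) = remain - (p - cur) := by ring
        have hs : (p - cur).toNat = (p - (cur + 1)).toNat + 1 := by omega
        have hfe : f - m = f + 1 - (m + 1) := by omega
        rw [he, hs, ← hfe]
        simp [pvSum]
        ring_nf

-- main correspondence: B's fold over the strictly sorted suffix xs simulates A's scan from prev+1
theorem pvLoopB_eq_loopA (S : List Int) : ∀ (xs : List Int) (fuel : Nat) (ans prev remain : Int),
    0 < remain →
    xs.Pairwise (· < ·) →
    (∀ x ∈ xs, x ∈ S) →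
    (∀ x ∈ S, prev < x → x ∈ xs) →
    remain.toNat + (S.filter (fun x => decide (prev + 1 ≤ x))).length ≤ fuel →
    pvLoopB xs ans prev remain = pvLoopA S fuel remain (prev + 1) ans := by
  intro xs
  induction xs with
  | nil =>
    intro fuel ans prev remain hr _ _ hcov hfuel
    rw [pvLoopB, pvLoopA_tail S fuel remain (prev + 1) ans (by omega)
      (fun x hx => by by_contra hc; exact absurd (hcov x hx (by omega)) (by simp))]
    rw [pvSum_eq_formula prev remain (by omega)]
    ring
  | cons p rest ih =>
    intro fuel ans prev remain hr hsort hmem hcov hfuel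
    have hsort' : rest.Pairwise (· < ·) := hsort.tail
    have hplt : ∀ x ∈ rest, p < x := fun x hx => (List.pairwise_cons.1 hsort).1 x hx
    by_cases hle : p ≤ prev
    · rw [pvLoopB, if_pos hle]
      exact ih fuel ans prev remain hr hsort' (fun x hx => hmem x (by simp [hx]))
        (fun x hx hgt => by
          rcases List.mem_cons.1 (hcov x hx hgt) with h | h
          · omega
          · exact h) hfuel
    · rw [pvLoopB, if_neg hle]
      have hpgt : prev < p := by omega
      have hfree : ∀ x ∈ S, ¬(prev + 1 ≤ x ∧ x < p) := by
        intro x hx ⟨h1, h2⟩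
        rcases List.mem_cons.1 (hcov x hx (by omega)) with h | h
        · omega
        · exact absurd (hplt x h) (by omega)
      rw [pvLoopA_gap S p (p - (prev + 1)).toNat fuel remain (prev + 1) ans (by omega)
        (by omega) hr hfree]
      simp only []
      by_cases hc : remain - min (p - prev - 1) remain = 0
      · rw [if_pos hc]
        have htake : min (p - prev - 1) remain = remain := by omega
        rw [if_pos (by omega)]
        rw [htake, pvSum_eq_formula prev remain (by omega)]
        ring
      · rw [if_neg hc]
        have htake : min (p - prev - 1) remain = p - prev - 1 := by omega
        rw [if_neg (by omega)]
        have hps : p ∈ S := hmem p (by simp)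
        rw [htake]
        have he : remain - (p - (prev + 1)) = remain - (p - prev - 1) := by ring
        rw [he]
        have ha : ans + pvSum (prev + 1) (p - (prev + 1)).toNat
            = ans + (p - prev - 1) * prev + PySem.Int.floordiv ((p - prev - 1) * (p - prev - 1 + 1)) 2 := by
          have hpp : (p - (prev + 1)) = p - prev - 1 := by ring
          rw [hpp, pvSum_eq_formula prev (p - prev - 1) (by omega)]
          ring
        rw [ha]
        -- one more A-step consumes p itself (p ∈ S), then the induction hypothesis applies
        have hcount : (S.filter (fun x => decide (p + 1 ≤ x))).length + 1
            ≤ (S.filter (fun x => decide (prev + 1 ≤ x))).length :=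
          pvFilter_lt S (prev + 1) p (by omega) hps
        have hr2 : 0 < remain - (p - prev - 1) := by omega
        obtain ⟨f, hf⟩ : ∃ f, fuel - (p - (prev + 1)).toNat = f + 1 := ⟨fuel - (p - (prev + 1)).toNat - 1, by omega⟩
        rw [hf, pvLoopA, if_pos hr2, if_pos hps]
        exact ih f _ p (remain - (p - prev - 1)) (by omega) hsort'
            (fun x hx => hmem x (by simp [hx]))
            (fun x hx hgt => by
              rcases List.mem_cons.1 (hcov x hx (by omega)) with h | h
              · exact absurd h.symm (by omega)
              · exact h)
            (by omega)

-- ===== VERDICT (by name: the statement is the Claim_ definition above) =====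
theorem shipParcels_spec : Claim_equal_shipParcels := by
  intro parcels k _
  unfold Spec_shipParcels shipParcels shipParcels_alt
  simp only []
  by_cases h : k - (parcels.length : Int) ≤ 0
  · rw [if_pos h, pvLoopA_zero _ _ _ _ _ (by omega)]
  · rw [if_neg h]
    have h0 : (0 : Int) + 1 = 1 := by ring
    rw [← h0]
    refine (pvLoopB_eq_loopA (PySem.Set.ofList parcels) _ _ 0 0 (k - parcels.length) (by omega)
      (PySem.List.sorted_ofList_pairwise_lt parcels)
      (fun x hx => (PySem.List.mem_sorted _ _ _ _).1 hx)
      (fun x hx _ => (PySem.List.mem_sorted _ _ _ _).2 hx)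
      ?_).symm
    rw [h0]
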